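-- pv_equiv track=rewrite | github.com/psubnwell/arsenal | annotation/annotool.bak.py | reduce_taggedseq
-- ===== SOURCE A (Python) =====
-- def reduce_taggedseq(word, flag, tag):
--     reduced_word = []
--     reduced_flag = []
--     reduced_tag = []
--     for i, (w, f, t) in enumerate(zip(word, flag, tag)):
--         if (i > 0) and ((f, t) == (flag[i-1], tag[i-1])):
--             reduced_word[-1] += w
--         else:
--             reduced_word.append(w)
--             reduced_flag.append(f)
--             reduced_tag.append(t)
--     return {'word':reduced_word, 'flag':reduced_flag, 'tag':reduced_tag}
-- ===== SOURCE B (Python) =====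
-- def reduce_taggedseq(word, flag, tag):
--     triples = list(zip(word, flag, tag))
--     n = len(triples)
--     out_w, out_f, out_t = [], [], []
--     i = 0
--     while i < n:
--         w, f, t = triples[i]
--         j = i + 1
--         while j < n and (triples[j][1], triples[j][2]) == (f, t):
--             w += triples[j][0]
--             j += 1
--         out_w.append(w)
--         out_f.append(f)
--         out_t.append(t)
--         i = j
--     return {'word': out_w, 'flag': out_f, 'tag': out_t}
-- ===== Notes on version B (the rewrite author's own statement) =====
-- stated objective: alternative
-- what changed: B replaces A's single index-lookback pass that patches reduced_word[-1] with a grouping-first two-pointer scan: an inner loop consumes each maximal run sharing (flag, tag) and emits one merged entry per run, never revisiting the output lists.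
import Mathlib
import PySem

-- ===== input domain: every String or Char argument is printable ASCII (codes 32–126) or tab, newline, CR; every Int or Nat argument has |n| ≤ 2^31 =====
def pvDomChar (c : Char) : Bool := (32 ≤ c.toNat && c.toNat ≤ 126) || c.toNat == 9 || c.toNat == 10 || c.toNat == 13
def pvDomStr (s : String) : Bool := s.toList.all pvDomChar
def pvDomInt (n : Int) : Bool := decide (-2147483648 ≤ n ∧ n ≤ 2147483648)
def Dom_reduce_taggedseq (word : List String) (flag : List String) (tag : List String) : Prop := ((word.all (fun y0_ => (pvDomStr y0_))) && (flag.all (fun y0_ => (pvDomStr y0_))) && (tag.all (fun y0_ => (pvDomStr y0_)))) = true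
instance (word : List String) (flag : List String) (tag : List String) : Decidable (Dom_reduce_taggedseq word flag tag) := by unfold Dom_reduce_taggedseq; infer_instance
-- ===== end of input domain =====

-- B restructures A's index-lookback pass (which patches reduced_word[-1]) into a grouping-first
-- two-pointer scan that consumes each maximal (flag, tag)-run with an inner loop; same O(n) cost.

-- ===== PORT A =====
-- reduced_word[-1] += w : append w to the last element.  The Python only executes this when
-- reduced_word is nonempty (guarded by i > 0), so the [] case is unreachable there.
def pvAddLast (l : List String) (w : String) : List String :=
  match l with
  | [] => []
  | [x] => [x ++ w]
  | x :: xs => x :: pvAddLast xs w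

-- the 'for i, (w, f, t) in enumerate(zip(...))' loop: recursion over the zipped list carrying i
def pvAGo (flag tag : List String) : Nat → List (String × String × String) →
    List String × List String × List String → List String × List String × List String
  | _, [], s => s
  | i, (w, f, t) :: rest, (rw, rf, rt) =>
    if 0 < i ∧ f = flag.getD (i - 1) "" ∧ t = tag.getD (i - 1) "" then
      -- flag[i-1]/tag[i-1]: i-1 is always in range here (0 < i ≤ zip length)
      pvAGo flag tag (i + 1) rest (pvAddLast rw w, rf, rt)
    else
      pvAGo flag tag (i + 1) rest (rw ++ [w], rf ++ [f], rt ++ [t])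

def reduce_taggedseq (word : List String) (flag : List String) (tag : List String) : List (String × List String) :=
  let s := pvAGo flag tag 0 (word.zip (flag.zip tag)) ([], [], [])
  [("word", s.1), ("flag", s.2.1), ("tag", s.2.2)]

-- ===== PORT B =====
-- the inner while loop: absorb the rest of the run with key k, return (merged word, remainder)
def pvBRun (w : String) (k : String × String) : List (String × String × String) →
    String × List (String × String × String)
  | [] => (w, [])
  | y :: rest => if y.2 = k then pvBRun (w ++ y.1) k rest else (w, y :: rest)

theorem pvBRun_snd_length_le (w : String) (k : String × String) :
    ∀ l : List (String × String × String), (pvBRun w k l).2.length ≤ l.length := by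
  intro l
  induction l generalizing w with
  | nil => simp [pvBRun]
  | cons y rest ih =>
    simp only [pvBRun]
    split
    · exact le_trans (ih _) (Nat.le_succ _)
    · simp

-- the outer while loop: one output entry per maximal run
def pvBGo : List (String × String × String) → List String × List String × List String
  | [] => ([], [], [])
  | x :: rest =>
    let r := pvBRun x.1 x.2 rest
    let s := pvBGo r.2
    (r.1 :: s.1, x.2.1 :: s.2.1, x.2.2 :: s.2.2)
termination_by l => l.length
decreasing_by
  exact Nat.lt_succ_of_le (pvBRun_snd_length_le x.1 x.2 rest)

def reduce_taggedseq_alt (word : List String) (flag : List String) (tag : List String) : List (String × List String) :=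
  let s := pvBGo (word.zip (flag.zip tag))
  [("word", s.1), ("flag", s.2.1), ("tag", s.2.2)]

-- ===== PRECONDITION & SPEC =====
def Spec_reduce_taggedseq (word : List String) (flag : List String) (tag : List String) (out : List (String × List String)) : Prop := out = reduce_taggedseq_alt word flag tag
instance (word : List String) (flag : List String) (tag : List String) (out : List (String × List String)) : Decidable (Spec_reduce_taggedseq word flag tag out) := by unfold Spec_reduce_taggedseq; infer_instance

-- ===== CLAIM (what is proved, stated in full; the proofs are below) =====
def Claim_equal_reduce_taggedseq : Prop := ∀ (word : List String) (flag : List String) (tag : List String), Dom_reduce_taggedseq word flag tag → Spec_reduce_taggedseq word flag tag (reduce_taggedseq word flag tag)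

-- ===== LEMMAS AND PROOFS =====

-- A's loop after the first iteration, with the index lookback replaced by the previous key
def pvALoop : List (String × String × String) → (String × String) →
    List String × List String × List String → List String × List String × List String
  | [], _, s => s
  | (w, f, t) :: rest, k, (rw, rf, rt) =>
    if (f, t) = k then pvALoop rest (f, t) (pvAddLast rw w, rf, rt)
    else pvALoop rest (f, t) (rw ++ [w], rf ++ [f], rt ++ [t])

theorem pvAddLast_append_singleton (rw : List String) (x w : String) :
    pvAddLast (rw ++ [x]) w = rw ++ [x ++ w] := by
  induction rw with
  | nil => simp [pvAddLast]
  | cons a l ih =>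
    cases l with
    | nil => simp [pvAddLast]
    | cons b l' => simpa [pvAddLast] using ih

-- the index lookback flag[i-1]/tag[i-1] reads exactly the previous zipped element's key
theorem pvAGo_eq_pvALoop (word flag tag : List String) :
    ∀ (rest pre : List (String × String × String)) (x : String × String × String) s,
      word.zip (flag.zip tag) = pre ++ x :: rest →
      pvAGo flag tag (pre.length + 1) rest s = pvALoop rest x.2 s := by
  intro rest
  induction rest with
  | nil => intro pre x s _; rfl
  | cons y rest' ih =>
    intro pre x s hz
    obtain ⟨x1, x2, x3⟩ := x
    obtain ⟨w', f', t'⟩ := y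
    obtain ⟨rw, rf, rt⟩ := s
    have hget : (word.zip (flag.zip tag))[pre.length]? = some (x1, x2, x3) := by
      rw [hz]
      rw [List.getElem?_append_right (le_refl pre.length)]
      simp
    have hx : word[pre.length]? = some x1 ∧ flag[pre.length]? = some x2 ∧ tag[pre.length]? = some x3 := by
      rw [List.getElem?_zip_eq_some] at hget
      obtain ⟨h1, h2⟩ := hget
      rw [List.getElem?_zip_eq_some] at h2
      exact ⟨h1, h2⟩
    have hf : flag.getD pre.length "" = x2 := by
      simp [List.getD_eq_getElem?_getD, hx.2.1]
    have ht : tag.getD pre.length "" = x3 := by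
      simp [List.getD_eq_getElem?_getD, hx.2.2]
    have hz' : word.zip (flag.zip tag) = (pre ++ [(x1, x2, x3)]) ++ (w', f', t') :: rest' := by
      simp [hz]
    have ihcall := fun s => ih (pre ++ [(x1, x2, x3)]) (w', f', t') s (by simpa using hz')
    simp only [List.length_append, List.length_cons, List.length_nil, Nat.zero_add] at ihcall
    simp only [pvAGo, pvALoop, Nat.add_sub_cancel, hf, ht]
    by_cases hk : f' = x2 ∧ t' = x3
    · rw [if_pos ⟨Nat.succ_pos _, hk⟩, if_pos (by simp [hk.1, hk.2])]
      exact ihcall _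
    · rw [if_neg (by tauto), if_neg (by simpa [Prod.ext_iff] using hk)]
      exact ihcall _

-- the core equivalence: A's patch-the-last-entry loop computes B's run decomposition
theorem pvALoop_eq_pvBGo :
    ∀ (zs : List (String × String × String)) (w : String) (k : String × String)
      (rw rf rt : List String),
      pvALoop zs k (rw ++ [w], rf ++ [k.1], rt ++ [k.2]) =
        (rw ++ (pvBGo ((w, k) :: zs)).1,
         rf ++ (pvBGo ((w, k) :: zs)).2.1,
         rt ++ (pvBGo ((w, k) :: zs)).2.2) := by
  intro zs
  induction zs with
  | nil =>
    intro w k rw rf rt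
    simp [pvALoop, pvBGo, pvBRun]
  | cons y zs' ih =>
    intro w k rw rf rt
    obtain ⟨w', f', t'⟩ := y
    by_cases h : (f', t') = k
    · -- same key: A appends to the last word, B's inner run absorbs it
      have hA : pvALoop ((w', f', t') :: zs') k (rw ++ [w], rf ++ [k.1], rt ++ [k.2]) =
          pvALoop zs' k (rw ++ [w ++ w'], rf ++ [k.1], rt ++ [k.2]) := by
        simp [pvALoop, pvAddLast_append_singleton, h]
      rw [hA, ih (w ++ w') k rw rf rt]
      have hB : pvBGo ((w, k) :: (w', f', t') :: zs') = pvBGo ((w ++ w', k) :: zs') := by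
        rw [pvBGo, pvBGo]
        simp [pvBRun, h]
      rw [hB]
    · -- new key: A opens a new entry, B starts a new run
      have hA : pvALoop ((w', f', t') :: zs') k (rw ++ [w], rf ++ [k.1], rt ++ [k.2]) =
          pvALoop zs' (f', t') ((rw ++ [w]) ++ [w'], (rf ++ [k.1]) ++ [f'], (rt ++ [k.2]) ++ [t']) := by
        simp only [pvALoop, if_neg h]
      rw [hA, ih w' (f', t') (rw ++ [w]) (rf ++ [k.1]) (rt ++ [k.2])]
      have hB : pvBGo ((w, k) :: (w', f', t') :: zs') =
          ((w :: (pvBGo ((w', f', t') :: zs')).1),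
           (k.1 :: (pvBGo ((w', f', t') :: zs')).2.1),
           (k.2 :: (pvBGo ((w', f', t') :: zs')).2.2)) := by
        conv_lhs => rw [pvBGo]
        simp [pvBRun, h]
      rw [hB]
      simp

-- ===== VERDICT (by name: the statement is the Claim_ definition above) =====
theorem reduce_taggedseq_spec : Claim_equal_reduce_taggedseq := by
  intro word flag tag _
  unfold Spec_reduce_taggedseq reduce_taggedseq reduce_taggedseq_alt
  cases hz : word.zip (flag.zip tag) with
  | nil => simp [pvAGo, pvBGo]
  | cons x rest =>
    obtain ⟨xw, xf, xt⟩ := x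
    have h0 : pvAGo flag tag 0 ((xw, xf, xt) :: rest) ([], [], []) =
        pvAGo flag tag 1 rest ([xw], [xf], [xt]) := by
      simp [pvAGo]
    have h1 : pvAGo flag tag 1 rest ([xw], [xf], [xt]) = pvALoop rest (xf, xt) ([xw], [xf], [xt]) := by
      have := pvAGo_eq_pvALoop word flag tag rest [] (xw, xf, xt) ([xw], [xf], [xt]) (by simpa using hz)
      simpa using this
    have h2 := pvALoop_eq_pvBGo rest xw (xf, xt) [] [] []
    simp only [List.nil_append] at h2
    simp [h0, h1, h2]
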